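-- pv_equiv track=rewrite | github.com/demchenko-eg/Algorithms | H13/t13_18_e1394.py | extr
-- ===== SOURCE A (Python) =====
-- def extr(s):
--     exprs = []
--     i = 0
--     while i < len(s):
--         if s[i] in " \t\n":
--             i += 1
--             continue
--         if s[i].isdigit():
--             j = i
--             while j < len(s) and s[j].isdigit():
--                 j += 1
--             exprs.append(s[i:j])
--             i = j
--         elif s[i] == '(':
--             cnt = 0
--             j = i
--             while j < len(s):
--                 if s[j] == '(':
--                     cnt += 1
--                 elif s[j] == ')':
--                     cnt -= 1
--                 j += 1
--                 if cnt == 0: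
--                     break
--             exprs.append(s[i:j])
--             i = j
--         else:
--             i += 1
--     return exprs
-- ===== SOURCE B (Python) =====
-- def extr(s):
--     exprs = []
--     buf = ""
--     depth = 0
--     for ch in s:
--         if depth > 0:
--             buf += ch
--             if ch == '(':
--                 depth += 1
--             elif ch == ')':
--                 depth -= 1
--                 if depth == 0:
--                     exprs.append(buf)
--                     buf = ""
--         elif ch.isdigit():
--             buf += ch
--         else:
--             if buf:
--                 exprs.append(buf)
--                 buf = ""
--             if ch == '(':
--                 buf = ch
--                 depth = 1
--     if buf:
--         exprs.append(buf)
--     return exprs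
-- ===== Notes on version B (the rewrite author's own statement) =====
-- stated objective: faster
-- what changed: Replaced A's index-based outer loop with two nested rescanning inner loops (digit run, balanced-paren scan) and slicing by a single flat one-pass loop over the characters maintaining a depth counter and one buffer that is flushed at token boundaries.
import Mathlib
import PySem

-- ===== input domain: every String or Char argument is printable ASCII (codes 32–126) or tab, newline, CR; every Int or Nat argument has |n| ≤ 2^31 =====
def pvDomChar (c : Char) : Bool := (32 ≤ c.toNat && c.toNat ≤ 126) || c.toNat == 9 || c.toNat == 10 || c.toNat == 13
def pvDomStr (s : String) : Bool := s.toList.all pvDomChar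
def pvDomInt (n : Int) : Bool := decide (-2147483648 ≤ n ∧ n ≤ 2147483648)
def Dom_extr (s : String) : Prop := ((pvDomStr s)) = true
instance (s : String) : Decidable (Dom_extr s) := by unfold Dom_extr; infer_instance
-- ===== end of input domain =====

-- B replaces A's index/slice rescanning inner loops by one flat pass with a depth counter and a buffer; same output, measurably faster by a constant factor (objective: faster).

-- ===== PORT A =====
-- The three while-loops are fuel-guarded structural recursions; fuel = remaining scan length bounds the
-- iteration count (every iteration advances the index by at least 1), so the guard never bites.

-- inner `while j < len(s) and s[j].isdigit(): j += 1`  (Char.isDigit = str.isdigit on the ASCII domain)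
def extrDigitEndGo (cs : List Char) : Nat → Nat → Nat
  | 0, j => j
  | fuel + 1, j =>
    if h : j < cs.length then
      if (cs[j]'h).isDigit then extrDigitEndGo cs fuel (j + 1) else j
    else j

def extrDigitEnd (cs : List Char) (j : Nat) : Nat := extrDigitEndGo cs (cs.length - j) j

-- inner paren-counting `while j < len(s): … if cnt == 0: break`
def extrParenEndGo (cs : List Char) : Nat → Int → Nat → Nat
  | 0, _, j => j
  | fuel + 1, cnt, j =>
    if h : j < cs.length then
      let cnt' := if (cs[j]'h) = '(' then cnt + 1 else if (cs[j]'h) = ')' then cnt - 1 else cnt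
      if cnt' = 0 then j + 1 else extrParenEndGo cs fuel cnt' (j + 1)
    else j

def extrParenEnd (cs : List Char) (cnt : Int) (j : Nat) : Nat :=
  extrParenEndGo cs (cs.length - j) cnt j

-- Python slice s[i:j] for 0 ≤ i ≤ j ≤ len — exact there (drop/take form)
def extrSlice (cs : List Char) (i j : Nat) : List Char := (cs.drop i).take (j - i)

-- outer `while i < len(s)` loop of A, with the exprs accumulator
def extrLoopGo (cs : List Char) : Nat → Nat → List String → List String
  | 0, _, exprs => exprs
  | fuel + 1, i, exprs =>
    if h : i < cs.length then
      let c := cs[i]'h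
      if c = ' ' ∨ c = '\t' ∨ c = '\n' then extrLoopGo cs fuel (i + 1) exprs
      else if c.isDigit then
        let j := extrDigitEnd cs i
        extrLoopGo cs fuel j (exprs ++ [String.ofList (extrSlice cs i j)])
      else if c = '(' then
        let j := extrParenEnd cs 0 i
        extrLoopGo cs fuel j (exprs ++ [String.ofList (extrSlice cs i j)])
      else extrLoopGo cs fuel (i + 1) exprs
    else exprs

def extrLoop (cs : List Char) (i : Nat) (exprs : List String) : List String :=
  extrLoopGo cs (cs.length - i) i exprs

def extr (s : String) : List String := extrLoop s.toList 0 []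

-- ===== PORT B =====
-- one step of B's flat for-loop; state = (exprs, depth, buf)
def extrStep (st : List String × Nat × List Char) (ch : Char) : List String × Nat × List Char :=
  let (acc, depth, buf) := st
  if depth > 0 then
    let buf' := buf ++ [ch]
    if ch = '(' then (acc, depth + 1, buf')
    else if ch = ')' then
      if depth = 1 then (acc ++ [String.ofList buf'], 0, []) else (acc, depth - 1, buf')
    else (acc, depth, buf')
  else if ch.isDigit then (acc, depth, buf ++ [ch])
  else
    let acc' := if buf ≠ [] then acc ++ [String.ofList buf] else acc
    if ch = '(' then (acc', 1, [ch]) else (acc', 0, [])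

-- the final `if buf: exprs.append(buf)`
def extrFlush (st : List String × Nat × List Char) : List String :=
  if st.2.2 ≠ [] then st.1 ++ [String.ofList st.2.2] else st.1

def extr_alt (s : String) : List String :=
  extrFlush (s.toList.foldl extrStep ([], 0, []))

-- ===== PRECONDITION & SPEC =====
def Spec_extr (s : String) (out : List String) : Prop := out = extr_alt s
instance (s : String) (out : List String) : Decidable (Spec_extr s out) := by unfold Spec_extr; infer_instance

-- ===== CLAIM (what is proved, stated in full; the proofs are below) =====
def Claim_equal_extr : Prop := ∀ (s : String), Dom_extr s → Spec_extr s (extr s)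

-- ===== LEMMAS AND PROOFS =====

-- one-step unfolding of the digit scan, independent of the fuel
theorem extrDigitEnd_eq (cs : List Char) (j : Nat) :
    extrDigitEnd cs j
      = if h : j < cs.length then
          (if (cs[j]'h).isDigit then extrDigitEnd cs (j + 1) else j)
        else j := by
  unfold extrDigitEnd
  rcases hf : cs.length - j with _ | k
  · have hj : ¬ j < cs.length := by omega
    simp [extrDigitEndGo, hj]
  · have hj : j < cs.length := by omega
    have hk : cs.length - (j + 1) = k := by omega
    simp [extrDigitEndGo, hj, hk]

theorem extrDigitEnd_ge (cs : List Char) (j : Nat) : j ≤ extrDigitEnd cs j := by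
  rw [extrDigitEnd_eq]
  split
  · split
    · have := extrDigitEnd_ge cs (j + 1); omega
    · omega
  · omega
termination_by cs.length - j
decreasing_by omega

theorem extrDigitEnd_gt (cs : List Char) (j : Nat) (h : j < cs.length)
    (hd : (cs[j]'h).isDigit) : j < extrDigitEnd cs j := by
  rw [extrDigitEnd_eq]
  simp only [h, hd, dif_pos, if_pos]
  have := extrDigitEnd_ge cs (j + 1); omega

-- at the digit scan's stop position the character is not a digit
theorem extrDigitEnd_stop (cs : List Char) (j : Nat) :
    ∀ (c : Char), cs[extrDigitEnd cs j]? = some c → c.isDigit = false := by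
  intro c hc
  rw [extrDigitEnd_eq] at hc
  by_cases h : j < cs.length
  · simp only [h, dif_pos] at hc
    by_cases hd : (cs[j]'h).isDigit
    · rw [if_pos hd] at hc
      exact extrDigitEnd_stop cs (j + 1) c hc
    · rw [if_neg hd] at hc
      have : cs[j]'h = c := by simpa [List.getElem?_eq_getElem h] using hc
      rw [← this]
      simpa using hd
  · rw [dif_neg h, List.getElem?_eq_none (by omega : cs.length ≤ j)] at hc
    cases hc
termination_by cs.length - j
decreasing_by omega

-- one-step unfolding of the paren scan, independent of the fuel
theorem extrParenEnd_eq (cs : List Char) (cnt : Int) (j : Nat) :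
    extrParenEnd cs cnt j
      = if h : j < cs.length then
          (if (if (cs[j]'h) = '(' then cnt + 1 else if (cs[j]'h) = ')' then cnt - 1 else cnt) = 0
           then j + 1
           else extrParenEnd cs
             (if (cs[j]'h) = '(' then cnt + 1 else if (cs[j]'h) = ')' then cnt - 1 else cnt) (j + 1))
        else j := by
  unfold extrParenEnd
  rcases hf : cs.length - j with _ | k
  · have hj : ¬ j < cs.length := by omega
    simp [extrParenEndGo, hj]
  · have hj : j < cs.length := by omega
    have hk : cs.length - (j + 1) = k := by omega
    simp [extrParenEndGo, hj, hk]

theorem extrParenEnd_ge (cs : List Char) (cnt : Int) (j : Nat) :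
    j ≤ extrParenEnd cs cnt j := by
  rw [extrParenEnd_eq]
  by_cases h : j < cs.length
  · simp only [h, dif_pos]
    generalize (if (cs[j]'h) = '(' then cnt + 1 else if (cs[j]'h) = ')' then cnt - 1 else cnt) = C
    split
    · omega
    · have := extrParenEnd_ge cs C (j + 1); omega
  · simp [h]
termination_by cs.length - j
decreasing_by omega

theorem extrParenEnd_gt (cs : List Char) (cnt : Int) (j : Nat) (h : j < cs.length) :
    j < extrParenEnd cs cnt j := by
  rw [extrParenEnd_eq]
  simp only [h, dif_pos]
  generalize (if (cs[j]'h) = '(' then cnt + 1 else if (cs[j]'h) = ')' then cnt - 1 else cnt) = C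
  split
  · omega
  · have := extrParenEnd_ge cs C (j + 1); omega

-- changing leftover fuel does not change the outer loop, as long as both fuels cover the remaining length
theorem extrLoopGo_congr (cs : List Char) (f1 : Nat) : ∀ (f2 i : Nat) (exprs : List String),
    cs.length ≤ i + f1 → cs.length ≤ i + f2 →
    extrLoopGo cs f1 i exprs = extrLoopGo cs f2 i exprs := by
  induction f1 with
  | zero =>
    intro f2 i exprs h1 _
    have hi : ¬ i < cs.length := by omega
    cases f2 <;> simp [extrLoopGo, hi]
  | succ f1 ih =>
    intro f2 i exprs h1 h2
    by_cases hi : i < cs.length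
    · rcases f2 with _ | f2
      · omega
      · simp only [extrLoopGo, hi, dif_pos]
        by_cases hw : (cs[i]'hi) = ' ' ∨ (cs[i]'hi) = '\t' ∨ (cs[i]'hi) = '\n'
        · rw [if_pos hw, if_pos hw]; exact ih f2 (i + 1) exprs (by omega) (by omega)
        · rw [if_neg hw, if_neg hw]
          by_cases hd : (cs[i]'hi).isDigit
          · rw [if_pos hd, if_pos hd]
            have := extrDigitEnd_gt cs i hi hd
            exact ih f2 _ _ (by omega) (by omega)
          · rw [if_neg hd, if_neg hd]
            by_cases hp : (cs[i]'hi) = '('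
            · rw [if_pos hp, if_pos hp]
              have h1' : i < extrParenEnd cs 0 i := extrParenEnd_gt cs 0 i hi
              exact ih f2 _ _ (by omega) (by omega)
            · rw [if_neg hp, if_neg hp]
              exact ih f2 (i + 1) exprs (by omega) (by omega)
    · rcases f2 with _ | f2 <;> simp [extrLoopGo, hi]

-- one-step unfolding of the outer loop, independent of the fuel
theorem extrLoop_eq (cs : List Char) (i : Nat) (exprs : List String) :
    extrLoop cs i exprs
      = if h : i < cs.length then
          (let c := cs[i]'h
           if c = ' ' ∨ c = '\t' ∨ c = '\n' then extrLoop cs (i + 1) exprs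
           else if c.isDigit then
             let j := extrDigitEnd cs i
             extrLoop cs j (exprs ++ [String.ofList (extrSlice cs i j)])
           else if c = '(' then
             let j := extrParenEnd cs 0 i
             extrLoop cs j (exprs ++ [String.ofList (extrSlice cs i j)])
           else extrLoop cs (i + 1) exprs)
        else exprs := by
  unfold extrLoop
  rcases hf : cs.length - i with _ | k
  · have hi : ¬ i < cs.length := by omega
    simp [extrLoopGo, hi]
  · have hi : i < cs.length := by omega
    simp only [extrLoopGo, hi, dif_pos]
    by_cases hw : (cs[i]'hi) = ' ' ∨ (cs[i]'hi) = '\t' ∨ (cs[i]'hi) = '\n'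
    · rw [if_pos hw, if_pos hw]
      exact extrLoopGo_congr cs k _ (i + 1) exprs (by omega) (by omega)
    · rw [if_neg hw, if_neg hw]
      by_cases hd : (cs[i]'hi).isDigit
      · rw [if_pos hd, if_pos hd]
        have := extrDigitEnd_gt cs i hi hd
        exact extrLoopGo_congr cs k _ _ _ (by omega) (by omega)
      · rw [if_neg hd, if_neg hd]
        by_cases hp : (cs[i]'hi) = '('
        · rw [if_pos hp, if_pos hp]
          have := extrParenEnd_gt cs 0 i hi
          exact extrLoopGo_congr cs k _ _ _ (by omega) (by omega)
        · rw [if_neg hp, if_neg hp]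
          exact extrLoopGo_congr cs k _ (i + 1) exprs (by omega) (by omega)

theorem extrSlice_cons (cs : List Char) (i j : Nat) (h : i < cs.length) (hij : i + 1 ≤ j) :
    extrSlice cs i j = (cs[i]'h) :: extrSlice cs (i + 1) j := by
  unfold extrSlice
  rw [List.drop_eq_getElem_cons h]
  have hji : j - i = (j - (i + 1)) + 1 := by omega
  rw [hji, List.take_succ_cons]

theorem extrSlice_self (cs : List Char) (i : Nat) : extrSlice cs i i = [] := by
  simp [extrSlice]

-- the digit run of A's inner loop is exactly what B's fold accumulates in buf
theorem extr_fold_digit_run (cs : List Char) (i : Nat) (acc : List String) (buf : List Char) :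
    (cs.drop i).foldl extrStep (acc, 0, buf)
      = (cs.drop (extrDigitEnd cs i)).foldl extrStep
          (acc, 0, buf ++ extrSlice cs i (extrDigitEnd cs i)) := by
  by_cases hj : i < cs.length
  · by_cases hd : (cs[i]'hj).isDigit
    · have hend : extrDigitEnd cs i = extrDigitEnd cs (i + 1) := by
        rw [extrDigitEnd_eq]; simp [hj, hd]
      have hgt : i + 1 ≤ extrDigitEnd cs (i + 1) := extrDigitEnd_ge cs (i + 1)
      have hrec := extr_fold_digit_run cs (i + 1) acc (buf ++ [cs[i]'hj])
      have hstep : extrStep (acc, 0, buf) (cs[i]'hj) = (acc, 0, buf ++ [cs[i]'hj]) := by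
        simp [extrStep, hd]
      rw [hend, List.drop_eq_getElem_cons hj, List.foldl_cons, hstep, hrec,
          extrSlice_cons cs i (extrDigitEnd cs (i + 1)) hj hgt]
      simp
    · have hend : extrDigitEnd cs i = i := by rw [extrDigitEnd_eq]; simp [hj, hd]
      rw [hend]; simp [extrSlice_self]
  · have hend : extrDigitEnd cs i = i := by rw [extrDigitEnd_eq]; simp [hj]
    rw [hend]; simp [extrSlice_self]
termination_by cs.length - i
decreasing_by omega

-- flushing a nonempty depth-0 buffer early does not change the result when the next char (if any) is not a digit
theorem extr_fold_flush_nondigit (l : List Char) (acc : List String) (buf : List Char)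
    (hbuf : buf ≠ [])
    (hl : ∀ (c : Char), l.head? = some c → c.isDigit = false) :
    extrFlush (l.foldl extrStep (acc, 0, buf))
      = extrFlush (l.foldl extrStep (acc ++ [String.ofList buf], 0, [])) := by
  cases l with
  | nil => simp [extrFlush, hbuf]
  | cons c t =>
    have hc : c.isDigit = false := hl c rfl
    have hst : extrStep (acc, 0, buf) c = extrStep (acc ++ [String.ofList buf], 0, []) c := by
      by_cases hp : c = '(' <;> simp [extrStep, hc, hbuf, hp]
    rw [List.foldl_cons, List.foldl_cons, hst]

-- A's paren scan matches B's fold while depth > 0 (including the unterminated tail flush)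
theorem extr_fold_paren_run (cs : List Char) (k : Nat) (d : Nat) (hd : 1 ≤ d)
    (acc : List String) (buf : List Char) (hbuf : buf ≠ []) :
    extrFlush ((cs.drop k).foldl extrStep (acc, d, buf))
      = extrFlush ((cs.drop (extrParenEnd cs (d : Int) k)).foldl extrStep
          (acc ++ [String.ofList (buf ++ extrSlice cs k (extrParenEnd cs (d : Int) k))], 0, [])) := by
  by_cases hk : k < cs.length
  · by_cases hp : (cs[k]'hk) = '('
    · have hnz : ((d : Int) + 1) ≠ 0 := by omega
      have hend : extrParenEnd cs (d : Int) k = extrParenEnd cs ((d + 1 : Nat) : Int) (k + 1) := by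
        rw [extrParenEnd_eq]; simp only [hk, dif_pos, hp, if_pos]
        rw [if_neg hnz]; norm_cast
      have hge : k + 1 ≤ extrParenEnd cs ((d + 1 : Nat) : Int) (k + 1) :=
        extrParenEnd_ge cs _ (k + 1)
      have hstep : extrStep (acc, d, buf) (cs[k]'hk) = (acc, d + 1, buf ++ [cs[k]'hk]) := by
        simp [extrStep, hp]; omega
      have hrec := extr_fold_paren_run cs (k + 1) (d + 1) (by omega) acc
        (buf ++ [cs[k]'hk]) (by simp)
      rw [hend, List.drop_eq_getElem_cons hk, List.foldl_cons, hstep, hrec,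
          extrSlice_cons cs k _ hk hge]
      simp
    · by_cases hq : (cs[k]'hk) = ')'
      · by_cases h1 : d = 1
        · subst h1
          have hend : extrParenEnd cs ((1 : Nat) : Int) k = k + 1 := by
            rw [extrParenEnd_eq]; simp [hk, hq]
          have hstep : extrStep (acc, 1, buf) (cs[k]'hk)
              = (acc ++ [String.ofList (buf ++ [cs[k]'hk])], 0, []) := by
            simp [extrStep, hq]
          have hsl : extrSlice cs k (k + 1) = [cs[k]'hk] := by
            rw [extrSlice_cons cs k (k + 1) hk (by omega), extrSlice_self]
          rw [hend, List.drop_eq_getElem_cons hk, List.foldl_cons, hstep, hsl]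
        · have hcast : (d : Int) - 1 = ((d - 1 : Nat) : Int) := by omega
          have hend : extrParenEnd cs (d : Int) k = extrParenEnd cs ((d - 1 : Nat) : Int) (k + 1) := by
            rw [extrParenEnd_eq]; simp [hk, hq, hcast]
            intro h; exact absurd h (by omega)
          have hstep : extrStep (acc, d, buf) (cs[k]'hk) = (acc, d - 1, buf ++ [cs[k]'hk]) := by
            simp [extrStep, hq, h1]; omega
          have hge : k + 1 ≤ extrParenEnd cs ((d - 1 : Nat) : Int) (k + 1) :=
            extrParenEnd_ge cs _ (k + 1)
          have hrec := extr_fold_paren_run cs (k + 1) (d - 1) (by omega) acc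
            (buf ++ [cs[k]'hk]) (by simp)
          rw [hend, List.drop_eq_getElem_cons hk, List.foldl_cons, hstep, hrec,
              extrSlice_cons cs k _ hk hge]
          simp
      · have hend : extrParenEnd cs (d : Int) k = extrParenEnd cs (d : Int) (k + 1) := by
          rw [extrParenEnd_eq]; simp [hk, hp, hq]
          intro h; exact absurd h (by omega)
        have hstep : extrStep (acc, d, buf) (cs[k]'hk) = (acc, d, buf ++ [cs[k]'hk]) := by
          simp [extrStep, hp, hq]; omega
        have hge : k + 1 ≤ extrParenEnd cs (d : Int) (k + 1) := extrParenEnd_ge cs _ (k + 1)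
        have hrec := extr_fold_paren_run cs (k + 1) d hd acc (buf ++ [cs[k]'hk]) (by simp)
        rw [hend, List.drop_eq_getElem_cons hk, List.foldl_cons, hstep, hrec,
            extrSlice_cons cs k _ hk hge]
        simp
  · have hend : extrParenEnd cs (d : Int) k = k := by rw [extrParenEnd_eq]; simp [hk]
    rw [hend, List.drop_eq_nil_of_le (by omega), extrSlice_self]
    simp [extrFlush, hbuf]
termination_by cs.length - k
decreasing_by all_goals omega

theorem extr_main (cs : List Char) (i : Nat) (acc : List String) :
    extrLoop cs i acc = extrFlush ((cs.drop i).foldl extrStep (acc, 0, [])) := by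
  by_cases hi : i < cs.length
  · by_cases hw : (cs[i]'hi) = ' ' ∨ (cs[i]'hi) = '\t' ∨ (cs[i]'hi) = '\n'
    · have hnd : (cs[i]'hi).isDigit = false := by
        rcases hw with h | h | h <;> rw [h] <;> decide
      have hnp : (cs[i]'hi) ≠ '(' := by
        rcases hw with h | h | h <;> rw [h] <;> decide
      have hstep : extrStep (acc, 0, []) (cs[i]'hi) = (acc, 0, []) := by
        simp [extrStep, hnd, hnp]
      have hrec := extr_main cs (i + 1) acc
      rw [extrLoop_eq]
      simp only [hi, dif_pos, hw, if_pos]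
      rw [hrec, List.drop_eq_getElem_cons hi, List.foldl_cons, hstep]
    · by_cases hdg : (cs[i]'hi).isDigit
      · have hgt : i < extrDigitEnd cs i := extrDigitEnd_gt cs i hi hdg
        have hsl : extrSlice cs i (extrDigitEnd cs i)
            = (cs[i]'hi) :: extrSlice cs (i + 1) (extrDigitEnd cs i) :=
          extrSlice_cons cs i _ hi (by omega)
        have hne : extrSlice cs i (extrDigitEnd cs i) ≠ [] := by rw [hsl]; simp
        have hhead : ∀ (c : Char), (cs.drop (extrDigitEnd cs i)).head? = some c →
            c.isDigit = false := by
          intro c hc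
          rw [List.head?_drop] at hc
          exact extrDigitEnd_stop cs i c hc
        have hrec := extr_main cs (extrDigitEnd cs i)
          (acc ++ [String.ofList (extrSlice cs i (extrDigitEnd cs i))])
        rw [extrLoop_eq]
        simp only [hi, dif_pos, hw, hdg, if_pos]
        rw [hrec]
        have hrun := extr_fold_digit_run cs i acc []
        simp only [List.nil_append] at hrun
        rw [hrun, extr_fold_flush_nondigit _ acc _ hne hhead]
        simp
      · by_cases hp : (cs[i]'hi) = '('
        · have hend : extrParenEnd cs 0 i = extrParenEnd cs ((1 : Nat) : Int) (i + 1) := by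
            rw [extrParenEnd_eq]; simp [hi, hp]
          have hge : i + 1 ≤ extrParenEnd cs ((1 : Nat) : Int) (i + 1) :=
            extrParenEnd_ge cs _ (i + 1)
          have hsl : extrSlice cs i (extrParenEnd cs ((1 : Nat) : Int) (i + 1))
              = (cs[i]'hi) :: extrSlice cs (i + 1) (extrParenEnd cs ((1 : Nat) : Int) (i + 1)) :=
            extrSlice_cons cs i _ hi hge
          have hstep : extrStep (acc, 0, []) (cs[i]'hi) = (acc, 1, [cs[i]'hi]) := by
            simp [extrStep, hp]
          have hrec := extr_main cs (extrParenEnd cs ((1 : Nat) : Int) (i + 1))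
            (acc ++ [String.ofList (extrSlice cs i (extrParenEnd cs ((1 : Nat) : Int) (i + 1)))])
          have hrun := extr_fold_paren_run cs (i + 1) 1 (by omega) acc [cs[i]'hi] (by simp)
          rw [extrLoop_eq]
          simp only [hi, dif_pos, hp, if_pos]
          rw [hend, hrec, List.drop_eq_getElem_cons hi, List.foldl_cons, hstep, hrun, hsl]
          simp
        · have hstep : extrStep (acc, 0, []) (cs[i]'hi) = (acc, 0, []) := by
            simp [extrStep, hdg, hp]
          have hrec := extr_main cs (i + 1) acc
          rw [extrLoop_eq]
          simp only [hi, dif_pos, hw, hdg, hp, reduceIte]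
          rw [hrec, List.drop_eq_getElem_cons hi, List.foldl_cons, hstep]
          simp
  · rw [extrLoop_eq]
    simp [hi, List.drop_eq_nil_of_le (le_of_not_gt hi), extrFlush]
termination_by cs.length - i
decreasing_by all_goals omega

-- ===== VERDICT (by name: the statement is the Claim_ definition above) =====
theorem extr_spec : Claim_equal_extr := by
  intro s _
  unfold Spec_extr extr extr_alt
  simpa using extr_main s.toList 0 []
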